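-- pv_equiv track=rewrite | github.com/oSemml/Introduction-to-Programming-WS24-25---my-solutions | solution-7.py | temp_decrease_fast
-- ===== SOURCE A (Python) =====
-- def temp_decrease_fast(L):
--     # Find the largest temperature decrease in the list L using an optimized approach
--     decrease = 0
--     max_index = 0
--     for i in range(1, len(L)):
--         if L[i] > L[max_index]:
--             max_index = i
--         elif decrease < L[max_index] - L[i]:
--             decrease = L[max_index] - L[i]
--     return decrease
-- ===== SOURCE B (Python) =====
-- def temp_decrease_fast(L):
--     # Prefix-maximum table first, then a separate difference scan over zip(m, L).
--     m = []
--     for x in L: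
--         m.append(x if not m else max(m[-1], x))
--     return max((p - x for p, x in zip(m, L)), default=0)
-- ===== Notes on version B (the rewrite author's own statement) =====
-- stated objective: alternative
-- what changed: Replaces the single interleaved loop that tracks a peak index and checks drops with two phases: materialize the prefix-maximum table m, then take the max (default 0) of the pointwise differences m[i] - L[i] over zip(m, L), with no index arithmetic at all.
import Mathlib
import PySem

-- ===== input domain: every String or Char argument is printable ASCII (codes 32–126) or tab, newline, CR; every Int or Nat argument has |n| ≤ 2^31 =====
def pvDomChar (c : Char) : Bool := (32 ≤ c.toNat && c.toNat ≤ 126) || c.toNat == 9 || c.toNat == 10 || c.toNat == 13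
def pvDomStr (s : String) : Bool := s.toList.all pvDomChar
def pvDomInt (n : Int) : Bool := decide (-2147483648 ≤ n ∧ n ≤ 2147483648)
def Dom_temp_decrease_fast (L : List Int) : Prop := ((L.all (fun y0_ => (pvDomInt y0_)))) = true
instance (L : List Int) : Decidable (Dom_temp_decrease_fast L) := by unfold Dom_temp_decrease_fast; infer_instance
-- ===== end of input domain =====

-- B replaces A's single interleaved peak-index/drop loop by a prefix-maximum table plus a
-- separate difference scan over zip(m, L) (alternative decomposition, same O(n) cost).


-- ===== PORT A =====
def temp_decrease_fast (L : List Int) : Int :=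
  (( (PySem.List.pyRange 1 (L.length : Int) 1).foldl
      (fun (s : Int × Int) i =>
        if PySem.List.pyGetD L i 0 > PySem.List.pyGetD L s.2 0 then (s.1, i)
        else if s.1 < PySem.List.pyGetD L s.2 0 - PySem.List.pyGetD L i 0 then
          (PySem.List.pyGetD L s.2 0 - PySem.List.pyGetD L i 0, s.2)
        else s)
      (0, 0) ) : Int × Int).1

-- ===== PORT B =====
def temp_decrease_fast_alt (L : List Int) : Int :=
  let m : List Int := L.foldl
    (fun (m : List Int) x => m ++ [if m = [] then x else max (PySem.List.pyGetD m (-1) 0) x]) []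
  PySem.List.maxD ((m.zip L).map (fun p => p.1 - p.2)) (fun y => y) 0

-- ===== PRECONDITION & SPEC =====
def Spec_temp_decrease_fast (L : List Int) (out : Int) : Prop := out = temp_decrease_fast_alt L
instance (L : List Int) (out : Int) : Decidable (Spec_temp_decrease_fast L out) := by unfold Spec_temp_decrease_fast; infer_instance

-- ===== CLAIM =====
def Claim_equal_temp_decrease_fast : Prop := ∀ (L : List Int), Dom_temp_decrease_fast L → Spec_temp_decrease_fast L (temp_decrease_fast L)

-- ===== LEMMAS AND PROOFS =====

-- common recursive skeleton: c = running max of elements seen so far, d = best drop so far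
def pvG (c d : Int) : List Int → Int × Int
  | [] => (c, d)
  | x :: xs => pvG (max c x) (max d (c - x)) xs

-- prefix maxima of xs, given c = max of the elements before xs
def pvScan (c : Int) : List Int → List Int
  | [] => []
  | x :: xs => max c x :: pvScan (max c x) xs

lemma pvScan_zip_diffs (xs : List Int) : ∀ (c d : Int), 0 ≤ d →
    List.foldl max d (((pvScan c xs).zip xs).map (fun p => p.1 - p.2)) = (pvG c d xs).2 := by
  induction xs with
  | nil => intro c d _; simp [pvG]
  | cons x xs ih =>
    intro c d hd
    have h1 : max d (max c x - x) = max d (c - x) := by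
      rcases le_total c x with h | h
      · rw [max_eq_right h]; omega
      · rw [max_eq_left h]
    simp only [pvScan, List.zip_cons_cons, List.map_cons, List.foldl_cons, pvG, h1]
    exact ih (max c x) (max d (c - x)) (by omega)

lemma pvBuild (xs : List Int) : ∀ (acc : List Int) (c : Int), acc ≠ [] →
    PySem.List.pyGetD acc (-1) 0 = c →
    xs.foldl (fun (m : List Int) x => m ++ [if m = [] then x else max (PySem.List.pyGetD m (-1) 0) x]) acc
      = acc ++ pvScan c xs := by
  induction xs with
  | nil => intro acc c _ _; simp [pvScan]
  | cons x xs ih =>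
    intro acc c hne hlast
    simp only [List.foldl_cons, if_neg hne, hlast]
    rw [ih (acc ++ [max c x]) (max c x) (by simp) (PySem.List.pyGetD_neg_one_append_singleton acc (max c x) 0)]
    simp [pvScan]

-- A's loop, started at index k with best drop d and peak index j (as facts about pyGetD),
-- computes pvG on the remaining suffix.
lemma pvLoopA (L : List Int) : ∀ (n k j : Nat) (c d : Int), L.length - k = n →
    k ≤ L.length → j < k → PySem.List.pyGetD L (j : Int) 0 = c → 0 ≤ d →
    ((PySem.List.pyRange (k : Int) (L.length : Int) 1).foldl
      (fun (s : Int × Int) i =>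
        if PySem.List.pyGetD L i 0 > PySem.List.pyGetD L s.2 0 then (s.1, i)
        else if s.1 < PySem.List.pyGetD L s.2 0 - PySem.List.pyGetD L i 0 then
          (PySem.List.pyGetD L s.2 0 - PySem.List.pyGetD L i 0, s.2)
        else s)
      (d, (j : Int))).1 = (pvG c d (L.drop k)).2 := by
  intro n
  induction n with
  | zero =>
    intro k j c d hn hk hj hc hd
    have hkl : k = L.length := by omega
    rw [PySem.List.pyRange_one_eq_nil (by simp [hkl])]
    simp [hkl, pvG]
  | succ n ih =>
    intro k j c d hn hk hj hc hd
    have hklt : k < L.length := by omega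
    rw [PySem.List.pyRange_one_cons (by exact_mod_cast hklt)]
    simp only [List.foldl_cons]
    rw [List.drop_eq_getElem_cons hklt]
    have hgk : PySem.List.pyGetD L (k : Int) 0 = L[k] := by
      rw [PySem.List.pyGetD_natCast]; exact List.getD_eq_getElem L 0 hklt
    have hcast : ((k : Int) + 1) = ((k + 1 : Nat) : Int) := by push_cast; ring
    rw [hcast]
    by_cases h1 : PySem.List.pyGetD L (k : Int) 0 > c
    · rw [if_pos (by rw [hc]; exact h1)]
      have hlt : c < L[k] := by rw [← hgk]; exact h1
      rw [pvG, max_eq_right hlt.le, max_eq_left (by omega : c - L[k] ≤ d)]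
      exact ih (k+1) k L[k] d (by omega) (by omega) (by omega) hgk hd
    · rw [if_neg (by rw [hc]; exact h1)]
      have hle : L[k] ≤ c := by rw [← hgk]; omega
      rw [hc, hgk]
      by_cases h2 : d < c - L[k]
      · rw [if_pos h2, pvG, max_eq_left hle, max_eq_right h2.le]
        exact ih (k+1) j c (c - L[k]) (by omega) (by omega) (by omega) hc (by omega)
      · rw [if_neg h2, pvG, max_eq_left hle, max_eq_left (by omega : c - L[k] ≤ d)]
        exact ih (k+1) j c d (by omega) (by omega) (by omega) hc hd

-- ===== VERDICT =====
theorem temp_decrease_fast_spec : Claim_equal_temp_decrease_fast := by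
  intro L _
  unfold Spec_temp_decrease_fast temp_decrease_fast temp_decrease_fast_alt
  cases L with
  | nil => decide
  | cons x xs =>
    -- B side: the built table is x :: pvScan x xs, so maxD folds max over the diffs
    have hm : (x :: xs).foldl
        (fun (m : List Int) x => m ++ [if m = [] then x else max (PySem.List.pyGetD m (-1) 0) x]) []
        = [x] ++ pvScan x xs := by
      simp only [List.foldl_cons, List.nil_append]
      exact pvBuild xs [x] x (List.cons_ne_nil x [])
        (PySem.List.pyGetD_neg_one_append_singleton [] x 0)
    simp only [hm]
    simp only [List.singleton_append, List.zip_cons_cons, List.map_cons]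
    rw [PySem.List.maxD_id_cons]
    have hB : List.foldl max (x - x) (((pvScan x xs).zip xs).map (fun p => p.1 - p.2))
        = (pvG x 0 xs).2 := by
      have h0 : x - x = (0 : Int) := by ring
      rw [h0]
      exact pvScan_zip_diffs xs x 0 le_rfl
    rw [hB]
    have hA := pvLoopA (x :: xs) xs.length 1 0 x 0 (by simp) (by simp) (by omega)
      (by simp) le_rfl
    simp only [Nat.cast_one, Nat.cast_zero, List.drop_one, List.tail_cons] at hA
    rw [hA]
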